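-- pv_equiv track=rewrite | github.com/BenTibi55/Memory | affiche_grid.py | affiche_grid_cache
-- ===== SOURCE A (Python) =====
-- def grid_to_string_with_size(grid, n, m):
--     # affiche la grille de la bonne taille
--     # grid est une liste de listes, n et m entiers
--     # renvoie une chaîne de caractères
--     string_grille = ""
--     string_grille += "=== "*m
--     string_grille += "\n"
--     for k in range(n):
--         for i in range(m):
--             string_grille += "|"+str(grid[k][i])+"| "
--         string_grille += "\n"
--         string_grille += "=== "*m
--         string_grille += "\n"
--     return string_grille
--
-- def affiche_grid_cache(grid):
--     # affiche la grille que verront les joueurs, avec des croix et des cases vides (les croix sont les cartes face cachée)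
--     # prend en argument une liste de listes et renvoie une chaîne de caractères
--     n = len(grid)
--     m = len(grid[0])
--     L = []
--     for i in range(n):
--         M = []
--         for j in range(m):
--             if grid[i][j] == " ":
--                 M.append(" ")
--             else:
--                 M.append("X")
--         L.append(M)
--     return grid_to_string_with_size(L, n, m)
-- ===== SOURCE B (Python) =====
-- def affiche_grid_cache(grid):
--     # single fused pass: never builds the intermediate masked grid
--     m = len(grid[0])
--     res = "=== " * m + "\n"
--     for row in grid:
--         for j in range(m):
--             res += "|" + ("X" if row[j] != " " else " ") + "| "
--         res += "\n" + "=== " * m + "\n"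
--     return res
-- ===== Notes on version B (the rewrite author's own statement) =====
-- stated objective: simpler
-- what changed: B drops the helper and the intermediate masked grid entirely, producing the display string in one fused pass over the rows with direct concatenation.
import Mathlib
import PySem

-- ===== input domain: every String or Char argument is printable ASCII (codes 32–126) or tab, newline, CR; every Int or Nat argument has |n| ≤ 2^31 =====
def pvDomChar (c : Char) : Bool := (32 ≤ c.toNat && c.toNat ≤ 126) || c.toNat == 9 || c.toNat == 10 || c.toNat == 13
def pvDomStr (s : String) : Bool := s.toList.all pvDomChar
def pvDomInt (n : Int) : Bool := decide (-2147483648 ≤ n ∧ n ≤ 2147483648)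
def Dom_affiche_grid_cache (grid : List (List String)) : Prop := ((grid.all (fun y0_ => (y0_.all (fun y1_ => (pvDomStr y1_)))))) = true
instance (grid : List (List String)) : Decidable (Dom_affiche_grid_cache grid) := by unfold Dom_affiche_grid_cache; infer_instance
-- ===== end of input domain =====

-- B replaces A's two-pass build (mask into an intermediate grid, then render it via a helper)
-- by a single fused pass over the rows that concatenates the display string directly (objective: simpler).

-- "=== " * m  (Python string repetition; shared by both ports since both Pythons write "=== "*m)
def strMul (s : String) : Nat → String
  | 0 => ""
  | k + 1 => strMul s k ++ s

-- ===== PORT A =====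
-- helper grid_to_string_with_size, transliterated (str(cell) is the identity on strings)
def grid_to_string_with_size (grid : List (List String)) (n m : Nat) : String :=
  let s1 := ("" ++ strMul "=== " m) ++ "\n"
  (List.range n).foldl (fun sg k =>
    (((List.range m).foldl (fun sg i => sg ++ ("|" ++ (grid.getD k []).getD i "" ++ "| ")) sg)
      ++ "\n") ++ strMul "=== " m ++ "\n") s1

def affiche_grid_cache (grid : List (List String)) : String :=
  let n := grid.length
  let m := (grid.getD 0 []).length
  let L := (List.range n).foldl (fun L i =>
    L ++ [(List.range m).foldl (fun M j =>
            M ++ [if (grid.getD i []).getD j "" == " " then " " else "X"]) []]) []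
  grid_to_string_with_size L n m

-- ===== PORT B =====
def affiche_grid_cache_alt (grid : List (List String)) : String :=
  let m := (grid.getD 0 []).length
  grid.foldl (fun res row =>
    ((List.range m).foldl (fun res j =>
        res ++ ("|" ++ (if row.getD j "" != " " then "X" else " ") ++ "| ")) res)
      ++ ("\n" ++ strMul "=== " m ++ "\n"))
    (strMul "=== " m ++ "\n")

-- ===== PRECONDITION & SPEC =====
-- Pre_ excludes exactly the inputs where the Python A raises IndexError: the empty grid
-- (grid[0]) and grids with a row shorter than the first row (grid[i][j], j < m).
def Pre_affiche_grid_cache (grid : List (List String)) : Prop :=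
  grid ≠ [] ∧ ∀ row ∈ grid, (grid.headD []).length ≤ row.length
instance (grid : List (List String)) : Decidable (Pre_affiche_grid_cache grid) := by
  unfold Pre_affiche_grid_cache; infer_instance

def pvWitness_affiche_grid_cache : List (List String) := [[" ", "q"], ["w", " "]]

def Spec_affiche_grid_cache (grid : List (List String)) (out : String) : Prop := out = affiche_grid_cache_alt grid
instance (grid : List (List String)) (out : String) : Decidable (Spec_affiche_grid_cache grid out) := by unfold Spec_affiche_grid_cache; infer_instance

-- ===== CLAIM (what is proved, stated in full; the proofs are below) =====
def Claim_equal_affiche_grid_cache : Prop := ∀ (grid : List (List String)), Dom_affiche_grid_cache grid → Pre_affiche_grid_cache grid → Spec_affiche_grid_cache grid (affiche_grid_cache grid)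

-- ===== LEMMAS AND PROOFS =====

-- a fold over range(n) reading L.getD, with n = L.length, is a structural fold over L
theorem foldl_range_getD {α β : Type} (L : List α) (F : β → α → β) (d : α) :
    ∀ init : β, (List.range L.length).foldl (fun acc k => F acc (L.getD k d)) init = L.foldl F init := by
  induction L with
  | nil => intro init; simp
  | cons a t ih =>
    intro init
    simp only [List.length_cons, List.range_succ_eq_map, List.foldl_cons, List.foldl_map]
    simpa using ih (F init a)

theorem foldl_range_getD' {α β : Type} (L : List α) (F : β → α → β) (d : α) (n : Nat)
    (h : L.length = n) (init : β) :
    (List.range n).foldl (fun acc k => F acc (L.getD k d)) init = L.foldl F init := by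
  subst h; exact foldl_range_getD L F d init

-- the masked cell rewritten the way B writes it
theorem mask_cell (s : String) :
    (if s == " " then " " else "X") = (if s != " " then "X" else " ") := by
  by_cases h : s = " " <;> simp [h]

-- equality of the two ports on every input (the ports themselves are total)
theorem ports_eq (grid : List (List String)) :
    affiche_grid_cache grid = affiche_grid_cache_alt grid := by
  unfold affiche_grid_cache affiche_grid_cache_alt grid_to_string_with_size
  simp only [PySem.List.foldl_append_singleton_eq_map, List.nil_append]
  set m := (grid.getD 0 []).length with hm
  set mrow : List String → List String :=
    (fun row => (List.range m).map (fun j => if row.getD j "" == " " then " " else "X")) with hmrow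
  have hL : (List.range grid.length).map
      (fun i => (List.range m).map (fun j => if (grid.getD i []).getD j "" == " " then " " else "X"))
      = (List.range grid.length).map (fun i => mrow (grid.getD i [])) := by
    simp [hmrow]
  rw [hL]
  rw [foldl_range_getD' ((List.range grid.length).map (fun i => mrow (grid.getD i [])))
      (fun sg row => (((List.range m).foldl (fun sg i => sg ++ ("|" ++ row.getD i "" ++ "| ")) sg)
        ++ "\n") ++ strMul "=== " m ++ "\n") [] grid.length (by simp)]
  rw [List.foldl_map]
  rw [foldl_range_getD' grid
      (fun sg row => (((List.range m).foldl (fun sg i => sg ++ ("|" ++ (mrow row).getD i "" ++ "| ")) sg)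
        ++ "\n") ++ strMul "=== " m ++ "\n") [] grid.length rfl]
  have hhdr : ("" ++ strMul "=== " m) ++ "\n" = strMul "=== " m ++ "\n" := by simp
  rw [hhdr]
  apply PySem.List.foldl_congr_mem
  intro acc row _
  have hinner : (List.range m).foldl (fun sg i => sg ++ ("|" ++ (mrow row).getD i "" ++ "| ")) acc
      = (List.range m).foldl (fun sg i => sg ++ ("|" ++ (if row.getD i "" != " " then "X" else " ") ++ "| ")) acc := by
    apply PySem.List.foldl_congr_mem
    intro acc' i hi
    have hi' : i < m := List.mem_range.mp hi
    have hcell : (mrow row).getD i "" = (if row.getD i "" == " " then " " else "X") := by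
      simp [hmrow, List.getD, hi']
    rw [hcell, mask_cell]
  rw [hinner]
  simp [String.append_assoc]

-- ===== VERDICT (by name: the statement is the Claim_ definition above) =====
theorem affiche_grid_cache_spec : Claim_equal_affiche_grid_cache := by
  intro grid _ _
  exact ports_eq grid
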